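-- pv_equiv track=rewrite | github.com/lorenzifrancesco/npse-collapse | solver.py | find_non_monotone_index
-- ===== SOURCE A (Python) =====
-- def find_non_monotone_index(arr):
--     if len(arr) < 2:
--         return -1  # Array is too short to determine monotonicity
--
--     increasing = None
--
--     for i in range(1, len(arr)):
--         if arr[i] == arr[i - 1]:
--             continue  # Skip equal elements
--
--         if increasing is None:
--             increasing = arr[i] > arr[i - 1]
--         elif (increasing and arr[i] < arr[i - 1]) or (not increasing and arr[i] > arr[i - 1]):
--             return i
--
--     return -1  # Array is monotone
-- ===== SOURCE B (Python) =====
-- def find_non_monotone_index(arr):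
--     if len(arr) < 2:
--         return -1
--     u = next((i for i in range(1, len(arr)) if arr[i] > arr[i - 1]), None)
--     d = next((i for i in range(1, len(arr)) if arr[i] < arr[i - 1]), None)
--     if u is None or d is None:
--         return -1
--     return max(u, d)
-- ===== Notes on version B (the rewrite author's own statement) =====
-- stated objective: alternative
-- what changed: Replaces the stateful direction tracker with early return by two independent scans that find the first strict rise u and the first strict fall d, returning max(u,d) when both exist and -1 otherwise.
import Mathlib
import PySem

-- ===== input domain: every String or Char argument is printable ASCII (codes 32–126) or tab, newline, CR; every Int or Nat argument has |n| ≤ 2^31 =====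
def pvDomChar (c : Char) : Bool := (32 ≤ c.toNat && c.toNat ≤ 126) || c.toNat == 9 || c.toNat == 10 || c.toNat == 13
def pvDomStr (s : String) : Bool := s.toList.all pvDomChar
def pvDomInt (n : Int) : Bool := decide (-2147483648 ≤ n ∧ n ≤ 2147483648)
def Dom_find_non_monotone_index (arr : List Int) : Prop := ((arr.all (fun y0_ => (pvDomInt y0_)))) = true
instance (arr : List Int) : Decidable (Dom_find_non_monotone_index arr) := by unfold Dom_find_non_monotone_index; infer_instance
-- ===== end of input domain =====

-- B replaces A's stateful direction tracker (with early return) by two independent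
-- first-strict-change scans combined with max; same O(n) cost, different decomposition.

-- ===== PORT A =====
-- A's for-loop: walk the list keeping the previous element, the running index i,
-- and the Optional[bool] 'increasing' state; an early 'return i' ends the recursion.
def pvGoA (prev : Int) (rest : List Int) (i : Nat) (inc : Option Bool) : Int :=
  match rest with
  | [] => -1
  | x :: rs =>
    if x = prev then pvGoA x rs (i + 1) inc
    else
      match inc with
      | none => pvGoA x rs (i + 1) (some (decide (x > prev)))
      | some b =>
        if (b && decide (x < prev)) || (!b && decide (x > prev)) then (i : Int)
        else pvGoA x rs (i + 1) (some b)

def find_non_monotone_index (arr : List Int) : Int :=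
  if arr.length < 2 then -1
  else
    match arr with
    | [] => -1
    | a :: rest => pvGoA a rest 1 none

-- ===== PORT B =====
-- first index i (counting from the given start) where p arr[i-1] arr[i] holds
def pvFirstIdx (p : Int → Int → Bool) (prev : Int) (rest : List Int) (i : Nat) : Option Nat :=
  match rest with
  | [] => none
  | x :: rs => if p prev x then some i else pvFirstIdx p x rs (i + 1)

def find_non_monotone_index_alt (arr : List Int) : Int :=
  if arr.length < 2 then -1
  else
    match arr with
    | [] => -1
    | a :: rest =>
      match pvFirstIdx (fun p x => decide (x > p)) a rest 1,
            pvFirstIdx (fun p x => decide (x < p)) a rest 1 with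
      | some u, some d => ((max u d : Nat) : Int)
      | _, _ => -1

-- ===== PRECONDITION & SPEC =====
def Spec_find_non_monotone_index (arr : List Int) (out : Int) : Prop := out = find_non_monotone_index_alt arr
instance (arr : List Int) (out : Int) : Decidable (Spec_find_non_monotone_index arr out) := by unfold Spec_find_non_monotone_index; infer_instance

-- ===== CLAIM (what is proved, stated in full; the proofs are below) =====
def Claim_equal_find_non_monotone_index : Prop := ∀ (arr : List Int), Dom_find_non_monotone_index arr → Spec_find_non_monotone_index arr (find_non_monotone_index arr)

-- ===== LEMMAS AND PROOFS =====

theorem pvFirstIdx_ge (p : Int → Int → Bool) (rest : List Int) :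
    ∀ (prev : Int) (i j : Nat), pvFirstIdx p prev rest i = some j → i ≤ j := by
  induction rest with
  | nil => intro prev i j h; simp [pvFirstIdx] at h
  | cons x rs ih =>
    intro prev i j h
    simp only [pvFirstIdx] at h
    split at h
    · cases h; exact Nat.le_refl _
    · exact Nat.le_of_succ_le (ih x (i + 1) j h)

-- once the direction is fixed (inc = some b), A returns the first change against b
theorem pvGoA_some (b : Bool) (rest : List Int) :
    ∀ (prev : Int) (i : Nat),
      pvGoA prev rest i (some b)
        = (match pvFirstIdx (fun p x => if b then decide (x < p) else decide (x > p)) prev rest i with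
           | some j => (j : Int)
           | none => -1) := by
  induction rest with
  | nil => intro prev i; simp [pvGoA, pvFirstIdx]
  | cons x rs ih =>
    intro prev i
    by_cases hxp : x = prev
    · subst hxp
      cases b <;> simp [pvGoA, pvFirstIdx, ih]
    · simp only [pvGoA, pvFirstIdx, if_neg hxp]
      cases b
      · -- b = false: trigger iff x > prev
        by_cases h : x > prev
        · simp [h, not_lt_of_gt h]
        · have h' : x < prev := lt_of_le_of_ne (not_lt.mp h) hxp
          simp [h, ih]
      · -- b = true: trigger iff x < prev
        by_cases h : x < prev
        · simp [h]
        · have h' : x > prev := lt_of_le_of_ne (not_lt.mp h) (Ne.symm hxp)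
          simp [h, ih]

-- with inc = none, A computes B's combine of the two first-change scans
theorem pvGoA_none (rest : List Int) :
    ∀ (prev : Int) (i : Nat),
      pvGoA prev rest i none
        = (match pvFirstIdx (fun p x => decide (x > p)) prev rest i,
                 pvFirstIdx (fun p x => decide (x < p)) prev rest i with
           | some u, some d => ((max u d : Nat) : Int)
           | _, _ => -1) := by
  induction rest with
  | nil => intro prev i; simp [pvGoA, pvFirstIdx]
  | cons x rs ih =>
    intro prev i
    by_cases hxp : x = prev
    · subst hxp
      simp [pvGoA, pvFirstIdx, ih]
    · simp only [pvGoA, pvFirstIdx, if_neg hxp]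
      by_cases h : x > prev
    -- x > prev: direction becomes 'increasing'; B's u = i, d is the later fall
      · simp only [h, decide_true, not_lt_of_gt h, decide_false, if_pos,
          Bool.false_eq_true, ite_false]
        rw [pvGoA_some true]
        cases hd : pvFirstIdx (fun p x => decide (x < p)) x rs (i + 1) with
        | none => simp [hd]
        | some d =>
          have := pvFirstIdx_ge _ _ _ _ _ hd
          simp [hd, Nat.max_eq_right (by omega : i ≤ d)]
      · have h' : x < prev := lt_of_le_of_ne (not_lt.mp h) hxp
        simp only [h, h', decide_true, decide_false, if_pos,
          Bool.false_eq_true, ite_false]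
        rw [pvGoA_some false]
        cases hu : pvFirstIdx (fun p x => decide (x > p)) x rs (i + 1) with
        | none => simp [hu]
        | some u =>
          have := pvFirstIdx_ge _ _ _ _ _ hu
          simp [hu, Nat.max_eq_left (by omega : i ≤ u)]

-- ===== VERDICT (by name: the statement is the Claim_ definition above) =====
theorem find_non_monotone_index_spec : Claim_equal_find_non_monotone_index := by
  intro arr _
  unfold Spec_find_non_monotone_index find_non_monotone_index find_non_monotone_index_alt
  by_cases hlen : arr.length < 2
  · simp [hlen]
  · simp only [hlen, if_false]
    match arr with
    | [] => rfl
    | a :: rest => exact pvGoA_none rest a 1
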